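-- pv_equiv track=rewrite | github.com/nabihestefan/AdventCalendar | 2017/day06/day6.py | getNew
-- ===== SOURCE A (Python) =====
-- def getNew(nums):
--     maxVal = max(nums)
--     maxI = nums.index(maxVal)
--     nums[maxI] = 0
--     i = (maxI+1)%len(nums)
--     for _ in range(maxVal):
--         nums[i] += 1
--         i = (i+1)%len(nums)
--     return nums
-- ===== SOURCE B (Python) =====
-- def getNew(nums):
--     # Closed-form redistribution: every bank gets maxVal // n, and the first
--     # maxVal % n banks after the emptied one get one extra block.
--     n = len(nums)
--     maxVal = max(nums)
--     maxI = nums.index(maxVal)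
--     base = [0 if k == maxI else v for k, v in enumerate(nums)]
--     if maxVal <= 0:
--         return base
--     q, r = divmod(maxVal, n)
--     return [base[k] + q + (1 if (k - maxI - 1) % n < r else 0) for k in range(n)]
-- ===== Notes on version B (the rewrite author's own statement) =====
-- stated objective: faster
-- what changed: Replaces the O(maxVal) one-block-at-a-time redistribution loop with a closed-form divmod: each bank gets maxVal//n and the first maxVal%n banks after the emptied one get one extra, built in a single O(n) comprehension.
import Mathlib
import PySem

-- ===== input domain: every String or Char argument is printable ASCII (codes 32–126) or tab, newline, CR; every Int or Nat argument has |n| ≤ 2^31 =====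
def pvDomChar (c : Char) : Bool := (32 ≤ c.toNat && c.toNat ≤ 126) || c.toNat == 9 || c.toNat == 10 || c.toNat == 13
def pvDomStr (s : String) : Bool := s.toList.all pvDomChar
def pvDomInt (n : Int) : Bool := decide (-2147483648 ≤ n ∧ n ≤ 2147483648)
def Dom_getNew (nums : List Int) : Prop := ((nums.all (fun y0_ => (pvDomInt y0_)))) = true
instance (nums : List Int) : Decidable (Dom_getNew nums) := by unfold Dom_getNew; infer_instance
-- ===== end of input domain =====

-- B replaces A's one-block-at-a-time O(maxVal) redistribution loop with a closed-form
-- O(n) divmod computation (each bank gets maxVal//n, the first maxVal%n banks after the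
-- emptied one get one extra). Equivalence is about the RETURN value only: Python A
-- mutates its argument in place, Python B builds a fresh list.

-- ===== PORT A =====
def getNew (nums : List Int) : List Int :=
  match PySem.List.max? nums (fun x => x) with
  | none => []          -- max([]) raises ValueError; excluded by Pre_getNew
  | some maxVal =>
    match PySem.List.index? nums maxVal with
    | none => []        -- unreachable: maxVal ∈ nums
    | some maxI =>
      let nums1 := nums.set maxI 0
      let i0 := (maxI + 1) % nums1.length
      let st := (List.range maxVal.toNat).foldl
        (fun (st : List Int × Nat) _ =>
          (st.1.modify st.2 (· + 1), (st.2 + 1) % st.1.length)) (nums1, i0)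
      st.1

-- ===== PORT B =====
def getNew_alt (nums : List Int) : List Int :=
  let n := nums.length
  match PySem.List.max? nums (fun x => x) with
  | none => []          -- max([]) raises ValueError; excluded by Pre_getNew
  | some maxVal =>
    match PySem.List.index? nums maxVal with
    | none => []        -- unreachable: maxVal ∈ nums
    | some maxI =>
      let base := (PySem.List.enumerate nums).map
        (fun kv => if kv.1 = (maxI : Int) then 0 else kv.2)
      if maxVal ≤ 0 then base
      else
        let q := PySem.Int.floordiv maxVal (n : Int)
        let r := PySem.Int.mod maxVal (n : Int)
        (List.range n).map (fun (k : Nat) =>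
          PySem.List.pyGetD base (k : Int) 0 + q +
            (if PySem.Int.mod ((k : Int) - (maxI : Int) - 1) (n : Int) < r then 1 else 0))

-- ===== PRECONDITION & SPEC =====
-- Pre_ excludes only the empty list, on which Python A raises ValueError (max of empty sequence).
def Pre_getNew (nums : List Int) : Prop := nums ≠ []
instance (nums : List Int) : Decidable (Pre_getNew nums) := by unfold Pre_getNew; infer_instance
def pvWitness_getNew : List Int := [3, 1]

def Spec_getNew (nums : List Int) (out : List Int) : Prop := out = getNew_alt nums
instance (nums : List Int) (out : List Int) : Decidable (Spec_getNew nums out) := by unfold Spec_getNew; infer_instance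

-- ===== CLAIM (what is proved, stated in full; the proofs are below) =====
def Claim_equal_getNew : Prop := ∀ (nums : List Int), Dom_getNew nums → Pre_getNew nums → Spec_getNew nums (getNew nums)

-- ===== LEMMAS AND PROOFS =====

-- successor step of / and % by a positive n, no-wrap case
lemma succ_div_mod_lt (n m : Nat) (hn : 0 < n) (h : m % n + 1 < n) :
    (m + 1) / n = m / n ∧ (m + 1) % n = m % n + 1 := by
  have hm : m + 1 = (m % n + 1) + n * (m / n) := by
    conv_lhs => rw [← Nat.div_add_mod m n]
    ring
  constructor
  · rw [hm, Nat.add_mul_div_left _ _ hn, Nat.div_eq_of_lt h, Nat.zero_add]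
  · rw [hm, Nat.add_mul_mod_self_left, Nat.mod_eq_of_lt h]

-- successor step of / and % by a positive n, wrap-around case
lemma succ_div_mod_eq (n m : Nat) (hn : 0 < n) (h : m % n + 1 = n) :
    (m + 1) / n = m / n + 1 ∧ (m + 1) % n = 0 := by
  have hm : m + 1 = n + n * (m / n) := by
    conv_lhs => rw [← Nat.div_add_mod m n]
    omega
  constructor
  · rw [hm, Nat.add_mul_div_left _ _ hn, Nat.div_self hn]
    omega
  · rw [hm, Nat.add_mul_mod_self_left, Nat.mod_self]

-- How many t < m have t % n = j  (0 < n, j < n): the closed form m/n + [j < m%n].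
lemma countP_mod_range (n j : Nat) (hn : 0 < n) (hj : j < n) :
    ∀ m : Nat, (List.range m).countP (fun t => t % n = j) =
      m / n + (if j < m % n then 1 else 0) := by
  intro m
  induction m with
  | zero => simp
  | succ m ih =>
    rw [List.range_succ, List.countP_append, ih]
    have hmn : m % n < n := Nat.mod_lt _ hn
    simp only [List.countP_cons, List.countP_nil, decide_eq_true_eq]
    rcases Nat.lt_or_ge (m % n + 1) n with h | h
    · obtain ⟨hd, hm'⟩ := succ_div_mod_lt n m hn h
      rw [hd, hm']
      split_ifs <;> omega
    · have h' : m % n + 1 = n := by omega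
      obtain ⟨hd, hm'⟩ := succ_div_mod_eq n m hn h'
      rw [hd, hm']
      split_ifs <;> omega

-- The predicate (i0 + t) % n = k coincides with t % n = (k + n - i0) % n.
lemma shift_mod_iff (n i0 k t : Nat) (hn : 0 < n) (hi : i0 < n) (hk : k < n) :
    ((i0 + t) % n = k) ↔ (t % n = (k + n - i0) % n) := by
  have ht : t % n < n := Nat.mod_lt _ hn
  have h1 : (i0 + t) % n = (i0 + t % n) % n := by
    conv_lhs => rw [Nat.add_mod, Nat.mod_eq_of_lt hi]
  have h2 : (i0 + t % n) % n = if i0 + t % n < n then i0 + t % n else i0 + t % n - n := by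
    split
    · exact Nat.mod_eq_of_lt ‹_›
    · rw [Nat.mod_eq_sub_mod (by omega)]
      exact Nat.mod_eq_of_lt (by omega)
  have h3 : (k + n - i0) % n = if i0 ≤ k then k - i0 else k + n - i0 := by
    split
    · rw [Nat.mod_eq_sub_mod (by omega)]
      have he : k + n - i0 - n = k - i0 := by omega
      rw [he]
      exact Nat.mod_eq_of_lt (by omega)
    · exact Nat.mod_eq_of_lt (by omega)
  rw [h1, h2, h3]
  split_ifs <;> omega

-- A's loop: length is preserved, and each entry k gains one unit per step hitting k.
lemma loopA (n : Nat) :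
    ∀ (m : Nat) (ns : List Int) (i0 : Nat), ns.length = n → i0 < n →
      (((List.range m).foldl
        (fun (st : List Int × Nat) _ =>
          (st.1.modify st.2 (· + 1), (st.2 + 1) % st.1.length)) (ns, i0)).1.length = n ∧
       ((List.range m).foldl
        (fun (st : List Int × Nat) _ =>
          (st.1.modify st.2 (· + 1), (st.2 + 1) % st.1.length)) (ns, i0)).2 = (i0 + m) % n ∧
       ∀ k : Nat,
        (((List.range m).foldl
          (fun (st : List Int × Nat) _ =>
            (st.1.modify st.2 (· + 1), (st.2 + 1) % st.1.length)) (ns, i0)).1)[k]? =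
          ns[k]?.map (· + ((List.range m).countP (fun t => (i0 + t) % n = k) : Int))) := by
  intro m
  induction m with
  | zero =>
    intro ns i0 hlen hi
    refine ⟨by simpa using hlen, by simpa using (Nat.mod_eq_of_lt hi).symm, ?_⟩
    intro k
    simp
  | succ m ih =>
    intro ns i0 hlen hi
    obtain ⟨hL, hI, hE⟩ := ih ns i0 hlen hi
    rw [List.range_succ, List.foldl_append]
    simp only [List.foldl_cons, List.foldl_nil]
    set st := (List.range m).foldl
      (fun (st : List Int × Nat) _ =>
        (st.1.modify st.2 (· + 1), (st.2 + 1) % st.1.length)) (ns, i0) with hst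
    refine ⟨by simpa [List.length_modify] using hL, ?_, ?_⟩
    · show (st.2 + 1) % st.1.length = (i0 + (m + 1)) % n
      rw [hL, hI, Nat.mod_add_mod, Nat.add_assoc]
    · intro k
      show (st.1.modify st.2 (· + 1))[k]? = _
      rw [List.getElem?_modify, hE k, hI, List.countP_append]
      simp only [List.countP_cons, List.countP_nil, decide_eq_true_eq, Nat.zero_add]
      by_cases h : (i0 + m) % n = k
      · cases hx : ns[k]?
        · simp [h]
        · simp only [Option.map_some, h, if_pos]
          simp
          ring
      · cases hx : ns[k]? <;> simp [h]

-- B's base list is A's nums.set maxI 0.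
lemma base_eq_set (nums : List Int) (maxI : Nat) :
    (PySem.List.enumerate nums).map (fun kv => if kv.1 = (maxI : Int) then 0 else kv.2) =
      nums.set maxI 0 := by
  apply List.ext_getElem?
  intro k
  simp only [List.getElem?_map, PySem.List.getElem?_enumerate, List.getElem?_set]
  cases hx : nums[k]? with
  | none =>
    have hlen : nums.length ≤ k := by
      have := List.getElem?_eq_none_iff.mp hx
      omega
    simp only [Option.map_none]
    split_ifs with h1 h2
    · exact absurd h2 (by omega)
    · rfl
    · rfl
  | some v =>
    obtain ⟨hk, -⟩ := List.getElem?_eq_some_iff.mp hx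
    simp only [Option.map_some]
    by_cases h : k = maxI
    · subst h
      simp [hk]
    · have h1 : ¬ ((0 : Int) + (k : Nat) = (maxI : Nat)) := by omega
      rw [if_neg h1, if_neg (fun hh => h hh.symm)]

-- The Python expression (k - maxI - 1) % n equals the Nat offset (k + n - (maxI+1)%n) % n.
lemma int_mod_offset (n maxI k : Nat) (hn : 0 < n) (hk : k < n) :
    PySem.Int.mod ((k : Int) - (maxI : Int) - 1) (n : Int) =
      (((k + n - (maxI + 1) % n) % n : Nat) : Int) := by
  have hi0 : (maxI + 1) % n < n := Nat.mod_lt _ hn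
  rw [PySem.Int.mod_eq_emod_of_pos (by exact_mod_cast hn)]
  rw [show (k : Int) - (maxI : Int) - 1 = (k : Int) - ((maxI + 1 : Nat) : Int) by push_cast; ring]
  rw [Int.sub_emod]
  rw [← Int.natCast_mod (maxI + 1) n]
  rw [← Int.natCast_mod k n, Nat.mod_eq_of_lt hk]
  rw [Int.natCast_mod (k + n - (maxI + 1) % n) n]
  rw [Nat.cast_sub (by omega : (maxI + 1) % n ≤ k + n), Nat.cast_add]
  rw [show (k : Int) + (n : Int) - (((maxI + 1) % n : Nat) : Int) =
      ((k : Int) - (((maxI + 1) % n : Nat) : Int)) + (n : Int) by ring]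
  rw [Int.add_emod_right]

-- ===== VERDICT (by name: the statement is the Claim_ definition above) =====
theorem getNew_spec : Claim_equal_getNew := by
  unfold Claim_equal_getNew
  intro nums _ hpre
  unfold Spec_getNew getNew getNew_alt
  cases hmax : PySem.List.max? nums (fun x => x) with
  | none =>
    exact absurd ((PySem.List.max?_eq_none_iff nums (fun x => x)).mp hmax) hpre
  | some maxVal =>
    have hmem : maxVal ∈ nums := PySem.List.max?_mem hmax
    dsimp only
    cases hidx : PySem.List.index? nums maxVal with
    | none =>
      exact absurd hmem ((PySem.List.index?_eq_none_iff nums maxVal).mp hidx)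
    | some maxI =>
      have hn : 0 < nums.length := List.length_pos_iff.mpr hpre
      dsimp only
      simp only [base_eq_set]
      obtain ⟨hL, -, hE⟩ := loopA nums.length maxVal.toNat (nums.set maxI 0)
        ((maxI + 1) % (nums.set maxI 0).length)
        (by simp) (by simp only [List.length_set]; exact Nat.mod_lt _ hn)
      by_cases hle : maxVal ≤ 0
      · rw [if_pos hle, Int.toNat_of_nonpos hle]
        simp
      · rw [if_neg hle]
        have hpos : 0 < maxVal := by omega
        have hmv : ((maxVal.toNat : Nat) : Int) = maxVal := Int.toNat_of_nonneg (by omega)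
        apply List.ext_getElem?
        intro k
        by_cases hk : k < nums.length
        · have hk1 : k < (nums.set maxI 0).length := by simpa using hk
          rw [hE k, List.getElem?_eq_getElem hk1, List.getElem?_map,
            List.getElem?_range hk]
          simp only [Option.map_some, Option.some.injEq, List.length_set]
          rw [PySem.List.pyGetD_natCast,
            List.getD_eq_getElem?_getD, List.getElem?_eq_getElem hk1, Option.getD_some]
          have hfd : PySem.Int.floordiv maxVal (nums.length : Int) =
              ((maxVal.toNat / nums.length : Nat) : Int) := by
            conv_lhs => rw [← hmv, PySem.Int.floordiv_natCast]
          have hmd : PySem.Int.mod maxVal (nums.length : Int) =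
              ((maxVal.toNat % nums.length : Nat) : Int) := by
            conv_lhs => rw [← hmv, PySem.Int.mod_natCast]
          rw [hfd, hmd, int_mod_offset nums.length maxI k hn hk]
          have hcong : (List.range maxVal.toNat).countP
              (fun t => ((maxI + 1) % nums.length + t) % nums.length = k)
              = (List.range maxVal.toNat).countP
              (fun t => t % nums.length = (k + nums.length - (maxI + 1) % nums.length) % nums.length) := by
            apply List.countP_congr
            intro t _
            have hs := shift_mod_iff nums.length ((maxI + 1) % nums.length) k t hn
              (Nat.mod_lt _ hn) hk
            simpa using hs
          rw [hcong, countP_mod_range nums.length _ hn (Nat.mod_lt _ hn) maxVal.toNat]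
          simp only [Nat.cast_lt, Nat.cast_add, Nat.cast_ite, Nat.cast_one, Nat.cast_zero]
          ring
        · have h1 : (nums.set maxI 0)[k]? = none := by
            rw [List.getElem?_eq_none_iff, List.length_set]
            omega
          rw [hE k, h1, Option.map_none]
          symm
          rw [List.getElem?_eq_none_iff, List.length_map, List.length_range]
          omega
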